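-- pv_equiv track=rewrite | github.com/PraneethaNL/Leetcode | miscellaneous/find_doubles.py | find_doubles
-- ===== SOURCE A (Python) =====
-- from collections import Counter
--
-- def find_doubles(nums:list):
--     count=Counter(nums)
--
--     res=[]
--
--     for i in range(501):
--         if i in count:
--             if i*2 in count and count[i*2]==1:
--                 res.append(i)
--
--     return res
-- ===== SOURCE B (Python) =====
-- from collections import Counter
--
-- def find_doubles(nums: list):
--     count = Counter(nums)
--     return sorted(k for k in count if 0 <= k <= 500 and count[2 * k] == 1)
-- ===== Notes on version B (the rewrite author's own statement) =====
-- stated objective: simpler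
-- what changed: B scans the Counter's distinct keys (filtering 0<=k<=500 with count[2k]==1) and sorts the survivors, instead of probing every candidate i in the fixed range(501) against the Counter.
import Mathlib
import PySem

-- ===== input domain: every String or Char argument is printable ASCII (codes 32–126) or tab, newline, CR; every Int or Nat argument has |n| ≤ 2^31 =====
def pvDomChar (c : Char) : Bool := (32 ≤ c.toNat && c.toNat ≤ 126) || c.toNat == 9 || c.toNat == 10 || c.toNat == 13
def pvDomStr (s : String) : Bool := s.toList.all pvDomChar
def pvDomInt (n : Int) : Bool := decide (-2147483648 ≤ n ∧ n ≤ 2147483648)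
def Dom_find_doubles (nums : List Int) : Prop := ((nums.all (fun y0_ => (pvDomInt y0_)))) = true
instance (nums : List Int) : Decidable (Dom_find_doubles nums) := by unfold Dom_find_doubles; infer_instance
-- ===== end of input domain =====

-- B replaces A's probe of every candidate i in range(501) by a filter over the Counter's
-- distinct keys followed by a sort (objective: simpler).

-- ===== PORT A =====
def find_doubles (nums : List Int) : List Int :=
  let count := PySem.Dict.counter nums
  (PySem.List.pyRange 0 501 1).foldl (fun res i =>
    if count.contains i then
      if count.contains (i * 2) && (count.getD (i * 2) 0 == 1) then res ++ [i]
      else res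
    else res) []

-- ===== PORT B =====
def find_doubles_alt (nums : List Int) : List Int :=
  let count := PySem.Dict.counter nums
  PySem.List.sorted
    (count.keys.filter (fun k =>
      decide (0 ≤ k) && decide (k ≤ 500) && (count.getD (2 * k) 0 == 1)))
    (fun x => x) false

-- ===== PRECONDITION & SPEC =====
def Spec_find_doubles (nums : List Int) (out : List Int) : Prop := out = find_doubles_alt nums
instance (nums : List Int) (out : List Int) : Decidable (Spec_find_doubles nums out) := by unfold Spec_find_doubles; infer_instance

-- ===== CLAIM (what is proved, stated in full; the proofs are below) =====
def Claim_equal_find_doubles : Prop := ∀ (nums : List Int), Dom_find_doubles nums → Spec_find_doubles nums (find_doubles nums)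

-- ===== LEMMAS AND PROOFS =====

-- A's loop as a filter of the range
theorem find_doubles_eq_filter (nums : List Int) :
    find_doubles nums = (PySem.List.pyRange 0 501 1).filter (fun i =>
      (PySem.Dict.counter nums).contains i &&
      ((PySem.Dict.counter nums).contains (i * 2) &&
       ((PySem.Dict.counter nums).getD (i * 2) 0 == 1))) := by
  show (PySem.List.pyRange 0 501 1).foldl (fun res i =>
      if (PySem.Dict.counter nums).contains i then
        if (PySem.Dict.counter nums).contains (i * 2) &&
            ((PySem.Dict.counter nums).getD (i * 2) 0 == 1) then res ++ [i]
        else res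
      else res) [] = _
  rw [show (fun (res : List Int) i =>
      if (PySem.Dict.counter nums).contains i then
        if (PySem.Dict.counter nums).contains (i * 2) &&
            ((PySem.Dict.counter nums).getD (i * 2) 0 == 1) then res ++ [i]
        else res
      else res) = (fun res i =>
      if (PySem.Dict.counter nums).contains i &&
          ((PySem.Dict.counter nums).contains (i * 2) &&
           ((PySem.Dict.counter nums).getD (i * 2) 0 == 1)) then res ++ [i]
      else res) from by
    funext res i
    by_cases h1 : (PySem.Dict.counter nums).contains i = true <;>
      simp [h1]]
  rw [PySem.List.foldl_append_if]
  simp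

-- the common semantic condition, A's shape
theorem condA_iff (nums : List Int) (i : Int) :
    ((PySem.Dict.counter nums).contains i &&
      ((PySem.Dict.counter nums).contains (i * 2) &&
       ((PySem.Dict.counter nums).getD (i * 2) 0 == 1))) = true ↔
    (i ∈ nums ∧ nums.count (i * 2) = 1) := by
  simp only [Bool.and_eq_true, PySem.Dict.contains_counter, PySem.Dict.getD_counter,
    List.contains_eq_mem, decide_eq_true_eq, beq_iff_eq]
  constructor
  · rintro ⟨h1, _, h3⟩
    exact ⟨h1, by exact_mod_cast h3⟩
  · rintro ⟨h1, h3⟩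
    refine ⟨h1, List.count_pos_iff.mp (by omega), by exact_mod_cast h3⟩

-- the common semantic condition, B's shape
theorem condB_iff (nums : List Int) (k : Int) :
    (decide (0 ≤ k) && decide (k ≤ 500) &&
      ((PySem.Dict.counter nums).getD (2 * k) 0 == 1)) = true ↔
    (0 ≤ k ∧ k ≤ 500 ∧ nums.count (2 * k) = 1) := by
  simp only [Bool.and_eq_true, decide_eq_true_eq, PySem.Dict.getD_counter, beq_iff_eq, and_assoc]
  constructor
  · rintro ⟨h1, h2, h3⟩
    exact ⟨h1, h2, by exact_mod_cast h3⟩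
  · rintro ⟨h1, h2, h3⟩
    exact ⟨h1, h2, by exact_mod_cast h3⟩

theorem find_doubles_nodup (nums : List Int) : (find_doubles nums).Nodup := by
  rw [find_doubles_eq_filter]
  refine List.Nodup.filter _ ?_
  rw [PySem.List.pyRange_one]
  refine List.Nodup.map ?_ (List.nodup_range)
  intro a b h
  simp only at h
  omega

theorem find_doubles_sorted (nums : List Int) :
    (find_doubles nums).Pairwise (fun a b => a < b) := by
  rw [find_doubles_eq_filter]
  refine List.Pairwise.filter _ ?_
  rw [PySem.List.pyRange_one]
  refine List.pairwise_map.mpr ?_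
  refine List.Pairwise.imp ?_ (List.pairwise_lt_range)
  intro a b h
  omega

theorem mem_find_doubles (nums : List Int) (x : Int) :
    x ∈ find_doubles nums ↔ (x ∈ nums ∧ 0 ≤ x ∧ x ≤ 500 ∧ nums.count (2 * x) = 1) := by
  rw [find_doubles_eq_filter, List.mem_filter, PySem.List.mem_pyRange_one, condA_iff]
  constructor
  · rintro ⟨⟨h0, h1⟩, hm, hc⟩
    exact ⟨hm, h0, by omega, by rwa [show (2 : Int) * x = x * 2 by ring]⟩
  · rintro ⟨hm, h0, h1, hc⟩
    exact ⟨⟨h0, by omega⟩, hm, by rwa [show x * 2 = 2 * x by ring]⟩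

theorem mem_keys_filter (nums : List Int) (x : Int) :
    x ∈ (PySem.Dict.counter nums).keys.filter (fun k =>
      decide (0 ≤ k) && decide (k ≤ 500) &&
      ((PySem.Dict.counter nums).getD (2 * k) 0 == 1)) ↔
    (x ∈ nums ∧ 0 ≤ x ∧ x ≤ 500 ∧ nums.count (2 * x) = 1) := by
  rw [List.mem_filter, condB_iff, PySem.Dict.keys_counter, PySem.Set.mem_ofList]

-- ===== VERDICT (by name: the statement is the Claim_ definition above) =====
theorem find_doubles_spec : Claim_equal_find_doubles := by
  intro nums _
  show find_doubles nums = PySem.List.sorted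
    ((PySem.Dict.counter nums).keys.filter (fun k =>
      decide (0 ≤ k) && decide (k ≤ 500) &&
      ((PySem.Dict.counter nums).getD (2 * k) 0 == 1)))
    (fun x => x) false
  refine (PySem.List.sorted_eq_of_perm_of_pairwise_lt _ _ _ ?_ ?_).symm
  · refine (List.perm_ext_iff_of_nodup (find_doubles_nodup nums) ?_).mpr ?_
    · exact List.Nodup.filter _ (by
        rw [PySem.Dict.keys_counter]; exact PySem.Set.nodup_ofList nums)
    · intro x
      rw [mem_find_doubles, mem_keys_filter]
  · exact find_doubles_sorted nums
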